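-- pv_equiv track=rewrite | github.com/lilywise96/ChoResearch | tree_modification.py | join_gt
-- ===== SOURCE A (Python) =====
-- def swap_key_value(key_to_value):
--     value_to_key = {}
--
--     for key in key_to_value:
--         for value in key_to_value[key]:
--             if value not in value_to_key:
--                 value_to_key[value] = set()
--             value_to_key[value].add(key)
--
--     return value_to_key
--
-- def join_gt(hp_tg, bp_tg, mf_tg):
--     hp_gt = swap_key_value(hp_tg)
--     bp_gt = swap_key_value(bp_tg)
--     mf_gt = swap_key_value(mf_tg)
--
--     all_gt = {}
--     for gene in hp_gt:
--         if gene not in all_gt: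
--             all_gt[gene] = set()
--         for term in hp_gt[gene]:
--             all_gt[gene].add(term)
--
--     for gene in bp_gt:
--         if gene not in all_gt:
--             all_gt[gene] = set()
--         for term in bp_gt[gene]:
--             all_gt[gene].add(term)
--
--     for gene in mf_gt:
--         if gene not in all_gt:
--             all_gt[gene] = set()
--         for term in mf_gt[gene]:
--             all_gt[gene].add(term)
--
--     return all_gt
-- ===== SOURCE B (Python) =====
-- def join_gt(hp_tg, bp_tg, mf_tg):
--     all_gt = {}
--     for tg in (hp_tg, bp_tg, mf_tg):
--         for term in tg:
--             for gene in tg[term]: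
--                 all_gt.setdefault(gene, set()).add(term)
--     return all_gt
-- ===== Notes on version B (the rewrite author's own statement) =====
-- stated objective: simpler
-- what changed: Replaces the swap_key_value helper (three intermediate inverted dicts) plus three separate merge loops with one direct inversion: a single nested loop over the three input mappings populating the result via setdefault, so no intermediate dicts are built and the merge passes disappear.
import Mathlib
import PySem

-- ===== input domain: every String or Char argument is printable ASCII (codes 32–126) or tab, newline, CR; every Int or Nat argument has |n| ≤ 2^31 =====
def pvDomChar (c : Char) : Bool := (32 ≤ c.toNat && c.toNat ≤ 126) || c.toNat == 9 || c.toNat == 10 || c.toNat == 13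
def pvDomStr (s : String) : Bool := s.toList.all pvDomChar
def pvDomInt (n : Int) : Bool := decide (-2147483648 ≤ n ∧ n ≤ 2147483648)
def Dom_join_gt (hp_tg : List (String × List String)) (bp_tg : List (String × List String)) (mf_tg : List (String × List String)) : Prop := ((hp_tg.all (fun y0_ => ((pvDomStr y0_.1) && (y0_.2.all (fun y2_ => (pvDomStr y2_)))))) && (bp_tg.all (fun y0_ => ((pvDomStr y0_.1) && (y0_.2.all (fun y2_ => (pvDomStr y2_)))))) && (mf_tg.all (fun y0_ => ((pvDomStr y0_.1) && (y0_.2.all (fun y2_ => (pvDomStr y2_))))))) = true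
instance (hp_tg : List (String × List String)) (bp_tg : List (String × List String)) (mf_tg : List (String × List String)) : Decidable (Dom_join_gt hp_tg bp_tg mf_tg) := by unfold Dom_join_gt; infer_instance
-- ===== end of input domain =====

-- B replaces the swap_key_value inversion helper and the three merge loops of A with a
-- single direct one-pass inversion over the three input mappings (objective: simpler).
-- ===== PORT A =====
def swap_key_value (key_to_value : PySem.Dict String (List String)) :
    PySem.Dict String (PySem.Set String) :=
  key_to_value.keys.foldl (fun value_to_key key =>
    (key_to_value.getD key []).foldl (fun value_to_key value =>
      let value_to_key :=
        if value_to_key.contains value then value_to_key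
        else value_to_key.insert value PySem.Set.empty
      value_to_key.insert value (PySem.Set.add (value_to_key.getD value PySem.Set.empty) key))
      value_to_key)
    PySem.Dict.empty

def join_gt (hp_tg : List (String × List String)) (bp_tg : List (String × List String))
    (mf_tg : List (String × List String)) : List (String × List String) :=
  let hp_gt := swap_key_value (PySem.Dict.mk hp_tg)
  let bp_gt := swap_key_value (PySem.Dict.mk bp_tg)
  let mf_gt := swap_key_value (PySem.Dict.mk mf_tg)
  let all_gt : PySem.Dict String (PySem.Set String) := PySem.Dict.empty
  let all_gt := hp_gt.keys.foldl (fun all_gt gene =>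
    let all_gt :=
      if all_gt.contains gene then all_gt else all_gt.insert gene PySem.Set.empty
    (hp_gt.getD gene PySem.Set.empty).foldl (fun all_gt term =>
      all_gt.insert gene (PySem.Set.add (all_gt.getD gene PySem.Set.empty) term)) all_gt) all_gt
  let all_gt := bp_gt.keys.foldl (fun all_gt gene =>
    let all_gt :=
      if all_gt.contains gene then all_gt else all_gt.insert gene PySem.Set.empty
    (bp_gt.getD gene PySem.Set.empty).foldl (fun all_gt term =>
      all_gt.insert gene (PySem.Set.add (all_gt.getD gene PySem.Set.empty) term)) all_gt) all_gt
  let all_gt := mf_gt.keys.foldl (fun all_gt gene =>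
    let all_gt :=
      if all_gt.contains gene then all_gt else all_gt.insert gene PySem.Set.empty
    (mf_gt.getD gene PySem.Set.empty).foldl (fun all_gt term =>
      all_gt.insert gene (PySem.Set.add (all_gt.getD gene PySem.Set.empty) term)) all_gt) all_gt
  all_gt.items

-- ===== PORT B =====
def join_gt_alt (hp_tg : List (String × List String)) (bp_tg : List (String × List String))
    (mf_tg : List (String × List String)) : List (String × List String) :=
  ([PySem.Dict.mk hp_tg, PySem.Dict.mk bp_tg, PySem.Dict.mk mf_tg].foldl
    (fun all_gt tg =>
      tg.keys.foldl (fun all_gt term =>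
        (tg.getD term []).foldl (fun all_gt gene =>
          PySem.Dict.modify all_gt gene PySem.Set.empty (fun s => PySem.Set.add s term))
          all_gt) all_gt)
    (PySem.Dict.empty : PySem.Dict String (PySem.Set String))).items


-- ===== PRECONDITION & SPEC =====
def Spec_join_gt (hp_tg : List (String × List String)) (bp_tg : List (String × List String)) (mf_tg : List (String × List String)) (out : List (String × List String)) : Prop := out = join_gt_alt hp_tg bp_tg mf_tg
instance (hp_tg : List (String × List String)) (bp_tg : List (String × List String)) (mf_tg : List (String × List String)) (out : List (String × List String)) : Decidable (Spec_join_gt hp_tg bp_tg mf_tg out) := by unfold Spec_join_gt; infer_instance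

-- ===== CLAIM (what is proved, stated in full; the proofs are below) =====
def Claim_equal_join_gt : Prop := ∀ (hp_tg : List (String × List String)) (bp_tg : List (String × List String)) (mf_tg : List (String × List String)), Dom_join_gt hp_tg bp_tg mf_tg → Spec_join_gt hp_tg bp_tg mf_tg (join_gt hp_tg bp_tg mf_tg)

-- ===== LEMMAS AND PROOFS =====

abbrev GD := PySem.Dict String (PySem.Set String)

def iAdd (b : GD) (g t : String) : GD :=
  b.insert g (PySem.Set.add (b.getD g PySem.Set.empty) t)
def ens (b : GD) (g : String) : GD :=
  if b.contains g then b else b.insert g PySem.Set.empty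

lemma contains_iff (b : GD) (g : String) : b.contains g = true ↔ g ∈ b.keys := by
  simp [PySem.Dict.contains, PySem.Dict.keys, List.any_eq_true, beq_iff_eq]

lemma keys_iAdd_mem (b : GD) (g t : String) (h : g ∈ b.keys) : (iAdd b g t).keys = b.keys := by
  simp only [iAdd, PySem.Dict.insert, (contains_iff b g).2 h, if_true, PySem.Dict.keys,
    List.map_map]
  apply List.map_congr_left
  intro p _
  by_cases hp : p.1 = g <;> simp [hp]

lemma keys_iAdd_not_mem (b : GD) (g t : String) (h : g ∉ b.keys) : (iAdd b g t).keys = b.keys ++ [g] := by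
  have : b.contains g = false := by
    simpa using (fun hc => h ((contains_iff b g).1 hc))
  simp [iAdd, PySem.Dict.insert, this, PySem.Dict.keys]

lemma keys_ens_mem (b : GD) (g : String) (h : g ∈ b.keys) : (ens b g).keys = b.keys := by
  simp [ens, (contains_iff b g).2 h]

lemma keys_ens_not_mem (b : GD) (g : String) (h : g ∉ b.keys) : (ens b g).keys = b.keys ++ [g] := by
  have : b.contains g = false := by
    simpa using (fun hc => h ((contains_iff b g).1 hc))
  simp [ens, this, PySem.Dict.insert, PySem.Dict.keys]

lemma mem_keys_iAdd (b : GD) (g k t : String) (h : k ∈ b.keys ∨ k = g) : k ∈ (iAdd b g t).keys := by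
  by_cases hg : g ∈ b.keys
  · rw [keys_iAdd_mem b g t hg]; rcases h with h | rfl
    · exact h
    · exact hg
  · rw [keys_iAdd_not_mem b g t hg]
    rcases h with h | rfl
    · simp [h]
    · simp

lemma nodup_keys_iAdd (b : GD) (g t : String) (h : b.keys.Nodup) : (iAdd b g t).keys.Nodup := by
  by_cases hg : g ∈ b.keys
  · rw [keys_iAdd_mem b g t hg]; exact h
  · rw [keys_iAdd_not_mem b g t hg]; simp [List.Nodup.append, h, hg]

lemma get?_eq_none_of_not_contains (b : GD) (g : String) (h : b.contains g = false) :
    b.get? g = none := by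
  simp only [PySem.Dict.contains, List.any_eq_false] at h
  simp only [PySem.Dict.get?, Option.map_eq_none_iff, List.find?_eq_none]
  exact h

lemma getD_iAdd_self (b : GD) (g t : String) :
    (iAdd b g t).getD g PySem.Set.empty = PySem.Set.add (b.getD g PySem.Set.empty) t := by
  simp [iAdd, PySem.Dict.getD, PySem.Dict.get?_insert_self]

lemma getD_iAdd_ne (b : GD) (g t k : String) (d : PySem.Set String) (hne : k ≠ g) :
    (iAdd b g t).getD k d = b.getD k d := by
  simp [iAdd, PySem.Dict.getD, PySem.Dict.get?_insert_of_ne _ _ hne]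

lemma contains_false_iff (b : GD) (g : String) : b.contains g = false ↔ g ∉ b.keys := by
  rw [← contains_iff]
  cases h : b.contains g <;> simp

lemma map_key_if_of_not_mem (L : List (String × PySem.Set String)) (g : String)
    (v : PySem.Set String) (h : ∀ p ∈ L, p.1 ≠ g) :
    L.map (fun p => if (p.1 == g) = true then (g, v) else p) = L := by
  conv_rhs => rw [← List.map_id L]
  apply List.map_congr_left
  intro p hp
  simp [h p hp]

lemma insert_mem_items (b : GD) (g : String) (v : PySem.Set String) (h : g ∈ b.keys) :
    (b.insert g v).items = b.items.map (fun p => if (p.1 == g) = true then (g, v) else p) := by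
  simp [PySem.Dict.insert, (contains_iff b g).2 h]

lemma insert_not_mem_items (b : GD) (g : String) (v : PySem.Set String) (h : g ∉ b.keys) :
    (b.insert g v).items = b.items ++ [(g, v)] := by
  simp [PySem.Dict.insert, (contains_false_iff b g).2 h]

lemma keys_insert_mem (b : GD) (g : String) (v : PySem.Set String) (h : g ∈ b.keys) :
    (b.insert g v).keys = b.keys := by
  simp only [PySem.Dict.keys, insert_mem_items b g v h, List.map_map]
  apply List.map_congr_left
  intro p _
  by_cases hp : p.1 = g <;> simp [hp]

lemma keys_insert_not_mem' (b : GD) (g : String) (v : PySem.Set String) (h : g ∉ b.keys) :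
    (b.insert g v).keys = b.keys ++ [g] := by
  simp [PySem.Dict.insert, (contains_false_iff b g).2 h, PySem.Dict.keys]

lemma insert_comm (b : GD) (g k : String) (v w : PySem.Set String) (hne : k ≠ g)
    (hg : g ∈ b.keys) : (b.insert g v).insert k w = (b.insert k w).insert g v := by
  by_cases hk : k ∈ b.keys
  · apply PySem.Dict.ext
    rw [insert_mem_items _ k w (by rw [keys_insert_mem b g v hg]; exact hk),
        insert_mem_items b g v hg,
        insert_mem_items _ g v (by rw [keys_insert_mem b k w hk]; exact hg),
        insert_mem_items b k w hk, List.map_map, List.map_map]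
    apply List.map_congr_left
    intro p _
    by_cases hpg : p.1 = g
    · simp [hpg, hne, Ne.symm hne]
    · by_cases hpk : p.1 = k <;> simp [hpg, hpk, hne, Ne.symm hne]
  · apply PySem.Dict.ext
    rw [insert_not_mem_items _ k w (by rw [keys_insert_mem b g v hg]; exact hk),
        insert_mem_items b g v hg,
        insert_mem_items _ g v (by rw [keys_insert_not_mem' b k w hk]; simp [hg]),
        insert_not_mem_items b k w hk, List.map_append]
    simp
    intro hkg
    exact absurd hkg hne

lemma iAdd_eq (b : GD) (g t : String) :
    iAdd b g t = b.insert g (PySem.Set.add (b.getD g PySem.Set.empty) t) := rfl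

lemma iAdd_comm (b : GD) (g t k u : String) (hne : k ≠ g) (hg : g ∈ b.keys) :
    iAdd (iAdd b g t) k u = iAdd (iAdd b k u) g t := by
  rw [iAdd_eq (iAdd b g t) k u, getD_iAdd_ne b g t k _ hne,
      iAdd_eq (iAdd b k u) g t, getD_iAdd_ne b k u g _ (Ne.symm hne),
      iAdd_eq b g t, iAdd_eq b k u]
  exact insert_comm b g k _ _ hne hg

lemma mem_keys_of_pair (b : GD) (p : String × PySem.Set String) (hp : p ∈ b.items) :
    p.1 ∈ b.keys := by
  rw [PySem.Dict.keys]
  exact List.mem_map_of_mem hp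

lemma keys_not_mem_pairs (b : GD) (g : String) (hg : g ∉ b.keys) :
    ∀ p ∈ b.items, p.1 ≠ g := by
  intro p hp hpg
  exact hg (hpg ▸ mem_keys_of_pair b p hp)

lemma get?_mk_append_of_mem (L M : List (String × PySem.Set String)) (g : String)
    (h : g ∈ L.map Prod.fst) :
    (PySem.Dict.mk (L ++ M)).get? g = (PySem.Dict.mk L).get? g := by
  simp only [PySem.Dict.get?, List.find?_append]
  obtain ⟨p, hp, hpg⟩ := List.mem_map.1 h
  have : (List.find? (fun p => p.1 == g) L).isSome := by
    rw [List.find?_isSome]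
    exact ⟨p, hp, by simp [hpg]⟩
  obtain ⟨q, hq⟩ := Option.isSome_iff_exists.1 this
  simp [hq]

lemma get?_mk_append_singleton_self (L : List (String × PySem.Set String)) (g : String)
    (v : PySem.Set String) (h : ∀ p ∈ L, p.1 ≠ g) :
    (PySem.Dict.mk (L ++ [(g, v)])).get? g = some v := by
  simp only [PySem.Dict.get?, List.find?_append]
  have : List.find? (fun p => p.1 == g) L = none := by
    rw [List.find?_eq_none]
    intro p hp
    simp [h p hp]
  simp [this]

lemma ens_of_mem (b : GD) (g : String) (h : g ∈ b.keys) : ens b g = b := by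
  simp [ens, (contains_iff b g).2 h]

lemma ens_of_not_mem (b : GD) (g : String) (h : g ∉ b.keys) :
    ens b g = PySem.Dict.mk (b.items ++ [(g, PySem.Set.empty)]) := by
  apply PySem.Dict.ext
  simp [ens, (contains_false_iff b g).2 h, insert_not_mem_items b g _ h]

lemma ens_iAdd (b : GD) (g t : String) : iAdd (ens b g) g t = iAdd b g t := by
  by_cases hg : g ∈ b.keys
  · rw [ens_of_mem b g hg]
  · have hc := (contains_false_iff b g).2 hg
    have hkeys := keys_not_mem_pairs b g hg
    rw [ens_of_not_mem b g hg, iAdd_eq, iAdd_eq]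
    have hget : (PySem.Dict.mk (b.items ++ [(g, PySem.Set.empty)])).getD g PySem.Set.empty
        = PySem.Set.empty := by
      simp [PySem.Dict.getD, get?_mk_append_singleton_self _ _ _ hkeys]
    have hgetb : b.getD g PySem.Set.empty = PySem.Set.empty := by
      simp [PySem.Dict.getD, get?_eq_none_of_not_contains b g hc]
    rw [hget, hgetb]
    have hmem : g ∈ (PySem.Dict.mk (b.items ++ [(g, PySem.Set.empty)])).keys := by
      simp [PySem.Dict.keys]
    apply PySem.Dict.ext
    rw [insert_mem_items _ g _ hmem, insert_not_mem_items b g _ hg, List.map_append,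
        map_key_if_of_not_mem _ _ _ hkeys]
    simp

lemma ens_iAdd_comm (b : GD) (g t k : String) (hne : k ≠ g) (hg : g ∈ b.keys) :
    ens (iAdd b g t) k = iAdd (ens b k) g t := by
  by_cases hk : k ∈ b.keys
  · rw [ens_of_mem _ k (by rw [keys_iAdd_mem b g t hg]; exact hk), ens_of_mem b k hk]
  · have hkadd : k ∉ (iAdd b g t).keys := by rw [keys_iAdd_mem b g t hg]; exact hk
    rw [ens_of_not_mem _ k hkadd, ens_of_not_mem b k hk,
        iAdd_eq (PySem.Dict.mk (b.items ++ [(k, PySem.Set.empty)])) g t]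
    have hget : (PySem.Dict.mk (b.items ++ [(k, PySem.Set.empty)])).getD g PySem.Set.empty
        = b.getD g PySem.Set.empty := by
      have := get?_mk_append_of_mem b.items [(k, PySem.Set.empty)] g
        (by simpa [PySem.Dict.keys] using hg)
      simp only [PySem.Dict.getD, this]
    rw [hget]
    have hmem : g ∈ (PySem.Dict.mk (b.items ++ [(k, PySem.Set.empty)])).keys := by
      simp only [PySem.Dict.keys, List.map_append, List.mem_append]
      exact Or.inl (by simpa [PySem.Dict.keys] using hg)
    apply PySem.Dict.ext
    rw [insert_mem_items _ g _ hmem, List.map_append, iAdd_eq, insert_mem_items b g _ hg]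
    simp only [PySem.Dict.items]
    congr 1
    simp only [List.map_cons, List.map_nil]
    rw [if_neg (by simp [hne])]

def Fstep (b : GD) (p : String × PySem.Set String) : GD :=
  p.2.foldl (fun b t => iAdd b p.1 t) (ens b p.1)
def mergeItems (b : GD) (L : List (String × PySem.Set String)) : GD := L.foldl Fstep b
def canon (b : GD) (ps : List (String × String)) : GD :=
  ps.foldl (fun b p => iAdd b p.1 p.2) b

lemma mem_keys_ens (b : GD) (g k : String) (h : k ∈ b.keys ∨ k = g) : k ∈ (ens b g).keys := by
  by_cases hg : g ∈ b.keys
  · rw [keys_ens_mem b g hg]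
    rcases h with h | rfl
    · exact h
    · exact hg
  · rw [keys_ens_not_mem b g hg]
    rcases h with h | rfl
    · simp [h]
    · simp

lemma nodup_keys_ens (b : GD) (g : String) (h : b.keys.Nodup) : (ens b g).keys.Nodup := by
  by_cases hg : g ∈ b.keys
  · rw [keys_ens_mem b g hg]; exact h
  · rw [keys_ens_not_mem b g hg]; simp [List.Nodup.append, h, hg]

lemma mem_keys_innerFold (s : List String) (b : GD) (g k : String) (h : k ∈ b.keys) :
    k ∈ (s.foldl (fun b t => iAdd b g t) b).keys := by
  induction s generalizing b with
  | nil => exact h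
  | cons u s ih => exact ih _ (mem_keys_iAdd b g k u (Or.inl h))

lemma nodup_keys_innerFold (s : List String) (b : GD) (g : String) (h : b.keys.Nodup) :
    (s.foldl (fun b t => iAdd b g t) b).keys.Nodup := by
  induction s generalizing b with
  | nil => exact h
  | cons u s ih => exact ih _ (nodup_keys_iAdd b g u h)

lemma mem_keys_Fstep (b : GD) (p : String × PySem.Set String) (k : String) (h : k ∈ b.keys) :
    k ∈ (Fstep b p).keys := by
  exact mem_keys_innerFold _ _ _ _ (mem_keys_ens b p.1 k (Or.inl h))

lemma nodup_keys_Fstep (b : GD) (p : String × PySem.Set String) (h : b.keys.Nodup) :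
    (Fstep b p).keys.Nodup := by
  exact nodup_keys_innerFold _ _ _ (nodup_keys_ens b p.1 h)

lemma nodup_keys_mergeItems (L : List (String × PySem.Set String)) (b : GD)
    (h : b.keys.Nodup) : (mergeItems b L).keys.Nodup := by
  induction L generalizing b with
  | nil => exact h
  | cons p L ih => exact ih _ (nodup_keys_Fstep b p h)

lemma nodup_keys_canon (ps : List (String × String)) (b : GD) (h : b.keys.Nodup) :
    (canon b ps).keys.Nodup := by
  induction ps generalizing b with
  | nil => exact h
  | cons p ps ih => exact ih _ (nodup_keys_iAdd b p.1 p.2 h)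

lemma get?_ens_ne (b : GD) (g k : String) (hne : g ≠ k) : (ens b k).get? g = b.get? g := by
  by_cases hk : k ∈ b.keys
  · rw [ens_of_mem b k hk]
  · rw [ens_of_not_mem b k hk]
    by_cases hg : g ∈ b.keys
    · exact get?_mk_append_of_mem b.items _ g (by simpa [PySem.Dict.keys] using hg)
    · rw [get?_eq_none_of_not_contains b g ((contains_false_iff b g).2 hg)]
      apply get?_eq_none_of_not_contains
      rw [contains_false_iff]
      simp only [PySem.Dict.keys, List.map_append, List.mem_append]
      rintro (h | h)
      · exact hg (by simpa [PySem.Dict.keys] using h)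
      · simp at h
        exact hne h

lemma mem_getD_iAdd (b : GD) (g t k u : String) (h : t ∈ b.getD g PySem.Set.empty) :
    t ∈ (iAdd b k u).getD g PySem.Set.empty := by
  by_cases hkg : k = g
  · subst hkg
    rw [getD_iAdd_self]
    rw [PySem.Set.mem_add]
    exact Or.inl h
  · rw [getD_iAdd_ne b k u g _ (fun hh => hkg hh.symm)]
    exact h

lemma mem_getD_ens (b : GD) (g k : String) (t : String) (h : t ∈ b.getD g PySem.Set.empty) :
    t ∈ (ens b k).getD g PySem.Set.empty := by
  by_cases hkg : g = k
  · subst hkg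
    by_cases hg : g ∈ b.keys
    · rw [ens_of_mem b g hg]; exact h
    · rw [PySem.Dict.getD, get?_eq_none_of_not_contains b g ((contains_false_iff b g).2 hg)] at h
      simp [PySem.Set.empty] at h
  · rw [PySem.Dict.getD, get?_ens_ne b g k hkg]
    exact h

lemma mem_getD_innerFold (s : List String) (b : GD) (g k : String) (t : String)
    (h : t ∈ b.getD g PySem.Set.empty) :
    t ∈ (s.foldl (fun b t' => iAdd b k t') b).getD g PySem.Set.empty := by
  induction s generalizing b with
  | nil => exact h
  | cons u s ih => exact ih _ (mem_getD_iAdd b g t k u h)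

lemma mem_getD_Fstep (b : GD) (p : String × PySem.Set String) (g t : String)
    (h : t ∈ b.getD g PySem.Set.empty) : t ∈ (Fstep b p).getD g PySem.Set.empty := by
  exact mem_getD_innerFold _ _ _ _ _ (mem_getD_ens b g p.1 t h)

lemma mem_getD_mergeItems (L : List (String × PySem.Set String)) (b : GD) (g t : String)
    (h : t ∈ b.getD g PySem.Set.empty) : t ∈ (mergeItems b L).getD g PySem.Set.empty := by
  induction L generalizing b with
  | nil => exact h
  | cons p L ih => exact ih _ (mem_getD_Fstep b p g t h)

lemma pair_unique (b : GD) (hnd : b.keys.Nodup) (p q : String × PySem.Set String)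
    (hp : p ∈ b.items) (hq : q ∈ b.items) (h : p.1 = q.1) : p = q := by
  exact List.inj_on_of_nodup_map hnd hp hq h

lemma get?_of_mem_nodup (b : GD) (hnd : b.keys.Nodup) (p : String × PySem.Set String)
    (hp : p ∈ b.items) : b.get? p.1 = some p.2 := by
  have hsome : (List.find? (fun q => q.1 == p.1) b.items).isSome := by
    rw [List.find?_isSome]
    exact ⟨p, hp, by simp⟩
  obtain ⟨q, hq⟩ := Option.isSome_iff_exists.1 hsome
  have hqmem : q ∈ b.items := List.mem_of_find?_eq_some hq
  have hqkey : q.1 = p.1 := by simpa using List.find?_some hq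
  have : q = p := pair_unique b hnd q p hqmem hp hqkey
  subst this
  simp [PySem.Dict.get?, hq]

lemma iAdd_self (b : GD) (g t : String) (hnd : b.keys.Nodup)
    (ht : t ∈ b.getD g PySem.Set.empty) : iAdd b g t = b := by
  rcases hs : b.get? g with _ | s
  · rw [PySem.Dict.getD, hs] at ht
    simp [PySem.Set.empty] at ht
  · have hval : b.getD g PySem.Set.empty = s := by simp [PySem.Dict.getD, hs]
    rw [hval] at ht
    have hg : g ∈ b.keys := by
      have hs' := hs
      simp only [PySem.Dict.get?] at hs'
      obtain ⟨a, hfind⟩ : ∃ a, List.find? (fun p => p.1 == g) b.items = some (a, s) := by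
        simpa using hs'
      have hqg : a = g := by simpa using List.find?_some hfind
      exact hqg ▸ mem_keys_of_pair b (a, s) (List.mem_of_find?_eq_some hfind)
    rw [iAdd_eq, hval, PySem.Set.add_of_mem ht]
    apply PySem.Dict.ext
    rw [insert_mem_items b g s hg]
    conv_rhs => rw [← List.map_id b.items]
    apply List.map_congr_left
    intro p hp
    by_cases hpg : p.1 = g
    · have : b.get? g = some p.2 := hpg ▸ get?_of_mem_nodup b hnd p hp
      rw [hs] at this
      have hps : s = p.2 := by injection this
      rw [if_pos (by simp [hpg]), ← hpg, hps]
      simp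
    · simp [hpg]

lemma innerFold_comm (s : List String) (b : GD) (g t k : String) (hne : k ≠ g)
    (hg : g ∈ b.keys) :
    s.foldl (fun b t' => iAdd b k t') (iAdd b g t) =
      iAdd (s.foldl (fun b t' => iAdd b k t') b) g t := by
  induction s generalizing b with
  | nil => rfl
  | cons u s ih =>
    simp only [List.foldl_cons]
    rw [iAdd_comm b g t k u hne hg]
    exact ih (iAdd b k u) (mem_keys_iAdd b k g u (Or.inl hg))

lemma Fstep_comm (b : GD) (p : String × PySem.Set String) (g t : String) (hne : p.1 ≠ g)
    (hg : g ∈ b.keys) : Fstep (iAdd b g t) p = iAdd (Fstep b p) g t := by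
  unfold Fstep
  rw [ens_iAdd_comm b g t p.1 hne hg]
  exact innerFold_comm p.2 (ens b p.1) g t p.1 hne (mem_keys_ens b p.1 g (Or.inl hg))

lemma mergeItems_comm (L : List (String × PySem.Set String)) (b : GD) (g t : String)
    (hL : ∀ p ∈ L, p.1 ≠ g) (hg : g ∈ b.keys) :
    mergeItems (iAdd b g t) L = iAdd (mergeItems b L) g t := by
  induction L generalizing b with
  | nil => rfl
  | cons p L ih =>
    simp only [mergeItems, List.foldl_cons]
    rw [show (List.foldl Fstep (Fstep (iAdd b g t) p) L) = mergeItems (Fstep (iAdd b g t) p) L from rfl,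
        Fstep_comm b p g t (hL p (by simp)) hg]
    exact ih (Fstep b p) (fun q hq => hL q (by simp [hq])) (mem_keys_Fstep b p g hg)

lemma mem_getD_innerFold_self (s : List String) (b : GD) (g t : String) (ht : t ∈ s) :
    t ∈ (s.foldl (fun b t' => iAdd b g t') b).getD g PySem.Set.empty := by
  induction s generalizing b with
  | nil => simp at ht
  | cons u s ih =>
    simp only [List.foldl_cons]
    rcases List.mem_cons.1 ht with rfl | hts
    · apply mem_getD_innerFold
      rw [getD_iAdd_self, PySem.Set.mem_add]
      exact Or.inr rfl
    · exact ih _ hts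

lemma keys_decomp_not_mem (G : GD) (g : String) (L1 L2 : List (String × PySem.Set String))
    (s : PySem.Set String) (hG : G.keys.Nodup) (hdec : G.items = L1 ++ (g, s) :: L2) :
    (∀ p ∈ L1, p.1 ≠ g) ∧ (∀ p ∈ L2, p.1 ≠ g) := by
  have hk : G.keys = L1.map (fun x => x.1) ++ g :: L2.map (fun x => x.1) := by
    show G.items.map (fun x => x.1) = _
    rw [hdec]
    simp
  rw [hk] at hG
  rw [List.nodup_append] at hG
  obtain ⟨h1, h2, h3⟩ := hG
  constructor
  · intro p hp hpg
    have m1 : g ∈ L1.map (fun x => x.1) := by rw [← hpg]; exact List.mem_map_of_mem hp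
    have m2 : g ∈ g :: L2.map (fun x => x.1) := by simp
    exact h3 g m1 g m2 rfl
  · intro p hp hpg
    rw [List.nodup_cons] at h2
    exact h2.1 (by rw [← hpg]; exact List.mem_map_of_mem hp)

lemma mergeItems_append_cons (b : GD) (L1 : List (String × PySem.Set String))
    (p : String × PySem.Set String) (L2 : List (String × PySem.Set String)) :
    mergeItems b (L1 ++ p :: L2) = mergeItems (Fstep (mergeItems b L1) p) L2 := by
  simp [mergeItems, List.foldl_append]

lemma mergeItems_append_singleton (b : GD) (L : List (String × PySem.Set String))
    (p : String × PySem.Set String) :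
    mergeItems b (L ++ [p]) = Fstep (mergeItems b L) p := by
  simp [mergeItems, List.foldl_append]

lemma mergeItems_iAdd (G b : GD) (g t : String) (hG : G.keys.Nodup) (hb : b.keys.Nodup) :
    mergeItems b (iAdd G g t).items = iAdd (mergeItems b G.items) g t := by
  by_cases hg : g ∈ G.keys
  · have hg' : g ∈ G.items.map (fun x => x.1) := hg
    obtain ⟨⟨g', ps⟩, hp, hpg⟩ := List.mem_map.1 hg'
    simp only at hpg
    rw [hpg] at hp
    obtain ⟨L1, L2, hdec⟩ := List.append_of_mem hp
    obtain ⟨h1, h2⟩ := keys_decomp_not_mem G g L1 L2 ps hG hdec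
    have hget : G.getD g PySem.Set.empty = ps := by
      have h := get?_of_mem_nodup G hG (g, ps) hp
      simp only at h
      simp [PySem.Dict.getD, h]
    have hitems : (iAdd G g t).items = L1 ++ (g, PySem.Set.add ps t) :: L2 := by
      rw [iAdd_eq, insert_mem_items G g _ hg, hget, hdec, List.map_append, List.map_cons,
          map_key_if_of_not_mem L1 g _ h1, map_key_if_of_not_mem L2 g _ h2]
      simp
    rw [hitems, hdec, mergeItems_append_cons, mergeItems_append_cons]
    by_cases ht : t ∈ ps
    · rw [PySem.Set.add_of_mem ht]
      have hbn : (mergeItems (Fstep (mergeItems b L1) (g, ps)) L2).keys.Nodup :=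
        nodup_keys_mergeItems _ _ (nodup_keys_Fstep _ _ (nodup_keys_mergeItems _ _ hb))
      have htm : t ∈ (mergeItems (Fstep (mergeItems b L1) (g, ps)) L2).getD g
          PySem.Set.empty := by
        apply mem_getD_mergeItems
        exact mem_getD_innerFold_self ps (ens (mergeItems b L1) g) g t ht
      exact (iAdd_self _ g t hbn htm).symm
    · rw [PySem.Set.add_of_not_mem ht]
      have hF : Fstep (mergeItems b L1) (g, ps ++ [t])
          = iAdd (Fstep (mergeItems b L1) (g, ps)) g t := by
        unfold Fstep
        simp only [List.foldl_append, List.foldl_cons, List.foldl_nil]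
      rw [hF]
      apply mergeItems_comm L2 _ g t h2
      apply mem_keys_innerFold
      exact mem_keys_ens _ g g (Or.inr rfl)
  · have hget : G.getD g PySem.Set.empty = PySem.Set.empty := by
      simp [PySem.Dict.getD,
        get?_eq_none_of_not_contains G g ((contains_false_iff G g).2 hg)]
    have hitems : (iAdd G g t).items = G.items ++ [(g, PySem.Set.add PySem.Set.empty t)] := by
      rw [iAdd_eq, hget, insert_not_mem_items G g _ hg]
    rw [hitems, mergeItems_append_singleton]
    have hadd : PySem.Set.add PySem.Set.empty t = [t] := rfl
    rw [hadd]
    show iAdd (ens (mergeItems b G.items) g) g t = iAdd (mergeItems b G.items) g t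
    exact ens_iAdd _ g t

def mergeOne (b G : GD) : GD :=
  G.keys.foldl (fun b gene =>
    (G.getD gene PySem.Set.empty).foldl (fun b term => iAdd b gene term) (ens b gene)) b
def swapC (tg : PySem.Dict String (List String)) : GD :=
  tg.keys.foldl (fun vk key =>
    (tg.getD key []).foldl (fun vk value => iAdd (ens vk value) value key) vk) PySem.Dict.empty
def directC (b : GD) (tg : PySem.Dict String (List String)) : GD :=
  tg.keys.foldl (fun b term =>
    (tg.getD term []).foldl (fun b gene => iAdd b gene term) b) b
def pairs (tg : PySem.Dict String (List String)) : List (String × String) :=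
  tg.keys.flatMap (fun k => (tg.getD k []).map (fun v => (v, k)))

lemma swapC_eq (tg : PySem.Dict String (List String)) :
    swapC tg = canon PySem.Dict.empty (pairs tg) := by
  unfold swapC canon pairs
  rw [List.foldl_flatMap]
  apply PySem.List.foldl_congr_mem
  intro acc key _
  rw [List.foldl_map]
  apply PySem.List.foldl_congr_mem
  intro acc2 x _
  exact ens_iAdd acc2 x key

lemma directC_eq (b : GD) (tg : PySem.Dict String (List String)) :
    directC b tg = canon b (pairs tg) := by
  unfold directC canon pairs
  rw [List.foldl_flatMap]
  apply PySem.List.foldl_congr_mem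
  intro acc key _
  rw [List.foldl_map]

lemma mergeOne_eq (G b : GD) (hG : G.keys.Nodup) : mergeOne b G = mergeItems b G.items := by
  unfold mergeOne
  rw [show G.keys = G.items.map (fun x => x.1) from rfl, List.foldl_map]
  apply PySem.List.foldl_congr_mem
  intro acc p hp
  have h := get?_of_mem_nodup G hG p hp
  have hgd : G.getD p.1 PySem.Set.empty = p.2 := by simp [PySem.Dict.getD, h]
  rw [hgd]
  rfl

lemma nodup_keys_empty : (PySem.Dict.empty : GD).keys.Nodup := List.nodup_nil

lemma mergeItems_canon (ps : List (String × String)) (b : GD) (hb : b.keys.Nodup) :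
    mergeItems b (canon PySem.Dict.empty ps).items = canon b ps := by
  induction ps using List.reverseRecOn with
  | nil => rfl
  | append_singleton ps p ih =>
    have h1 : canon PySem.Dict.empty (ps ++ [p]) = iAdd (canon PySem.Dict.empty ps) p.1 p.2 := by
      simp [canon, List.foldl_append]
    have h2 : canon b (ps ++ [p]) = iAdd (canon b ps) p.1 p.2 := by
      simp [canon, List.foldl_append]
    rw [h1, h2, mergeItems_iAdd _ _ _ _ (nodup_keys_canon ps _ nodup_keys_empty) hb, ih]

lemma nodup_keys_directC (b : GD) (tg : PySem.Dict String (List String))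
    (hb : b.keys.Nodup) : (directC b tg).keys.Nodup := by
  rw [directC_eq]
  exact nodup_keys_canon _ _ hb

lemma mergeOne_swapC (b : GD) (tg : PySem.Dict String (List String)) (hb : b.keys.Nodup) :
    mergeOne b (swapC tg) = directC b tg := by
  rw [swapC_eq, mergeOne_eq _ _ (nodup_keys_canon _ _ nodup_keys_empty),
      mergeItems_canon _ _ hb, directC_eq]

theorem grand (hp bp mf : List (String × List String)) :
    (mergeOne (mergeOne (mergeOne PySem.Dict.empty (swapC (PySem.Dict.mk hp)))
        (swapC (PySem.Dict.mk bp))) (swapC (PySem.Dict.mk mf))).items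
    = (directC (directC (directC PySem.Dict.empty (PySem.Dict.mk hp))
        (PySem.Dict.mk bp)) (PySem.Dict.mk mf)).items := by
  rw [mergeOne_swapC _ _ nodup_keys_empty,
      mergeOne_swapC _ _ (nodup_keys_directC _ _ nodup_keys_empty),
      mergeOne_swapC _ _ (nodup_keys_directC _ _ (nodup_keys_directC _ _ nodup_keys_empty))]

lemma portA_eq (hp bp mf : List (String × List String)) :
    join_gt hp bp mf = (mergeOne (mergeOne (mergeOne PySem.Dict.empty
      (swapC (PySem.Dict.mk hp))) (swapC (PySem.Dict.mk bp)))
      (swapC (PySem.Dict.mk mf))).items := rfl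

lemma portB_eq (hp bp mf : List (String × List String)) :
    join_gt_alt hp bp mf = (directC (directC (directC PySem.Dict.empty
      (PySem.Dict.mk hp)) (PySem.Dict.mk bp)) (PySem.Dict.mk mf)).items := rfl


-- ===== VERDICT (by name: the statement is the Claim_ definition above) =====
theorem join_gt_spec : Claim_equal_join_gt := by
  intro hp_tg bp_tg mf_tg _
  unfold Spec_join_gt
  rw [portA_eq, portB_eq]
  exact grand hp_tg bp_tg mf_tg
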